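-- pv_equiv track=rewrite | github.com/JasonVann/CS61A | HW/hw03/hw03.py | g_iter2
-- ===== SOURCE A (Python) =====
-- def g_iter2(n):
--     # sol
--     if n == 1 or n == 2 or n == 3:
--         return n
--     a, b, c = 1, 2, 3
--     while n > 3:
--         a, b, c = b, c, c + 2*b + 3*a
--         n = n - 1
--     return c
-- ===== SOURCE B (Python) =====
-- def g_iter2(n):
--     # Alternative algorithm: matrix exponentiation of the recurrence g(k) = g(k-1) + 2*g(k-2) + 3*g(k-3):
--     # the state (a,b,c) after max(n-3,0) steps is M**max(n-3,0) applied to (1,2,3).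
--     if n == 1 or n == 2:
--         return n
--
--     def mul(X, Y):
--         return tuple(tuple(sum(X[i][t] * Y[t][j] for t in range(3)) for j in range(3))
--                      for i in range(3))
--
--     I = ((1, 0, 0), (0, 1, 0), (0, 0, 1))
--     M = ((0, 1, 0), (0, 0, 1), (3, 2, 1))
--
--     def mpow(k):
--         if k == 0:
--             return I
--         h = mpow(k // 2)
--         s = mul(h, h)
--         return mul(s, M) if k % 2 == 1 else s
--
--     P = mpow(max(n - 3, 0))
--     return P[2][0] * 1 + P[2][1] * 2 + P[2][2] * 3
-- ===== Notes on version B (the rewrite author's own statement) =====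
-- stated objective: alternative
-- what changed: Replaces the linear step-by-step loop over the state (a,b,c) with binary exponentiation of the 3x3 companion matrix of the recurrence (O(log n) matrix multiplications instead of n-3 loop steps).
import Mathlib
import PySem

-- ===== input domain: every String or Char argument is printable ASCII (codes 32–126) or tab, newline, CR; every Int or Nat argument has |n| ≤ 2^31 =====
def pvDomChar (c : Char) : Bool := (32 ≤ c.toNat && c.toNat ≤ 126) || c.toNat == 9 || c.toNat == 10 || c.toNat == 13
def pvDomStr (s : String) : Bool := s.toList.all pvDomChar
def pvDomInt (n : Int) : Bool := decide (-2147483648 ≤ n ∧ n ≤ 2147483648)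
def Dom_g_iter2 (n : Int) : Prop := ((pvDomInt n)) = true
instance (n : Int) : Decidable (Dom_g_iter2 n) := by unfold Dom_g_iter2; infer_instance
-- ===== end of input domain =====

-- B replaces A's linear recurrence loop by binary exponentiation of the 3x3 companion matrix (alternative algorithm; O(log n) matrix multiplications instead of n-3 loop steps, speed not measured here).


-- ===== PORT A =====
-- the while loop: runs exactly max(n-3,0) times, state (a,b,c) -> (b,c,c+2b+3a)
def loopA : Nat → Int → Int → Int → Int
  | 0, _, _, c => c
  | k+1, a, b, c => loopA k b c (c + 2*b + 3*a)

def g_iter2 (n : Int) : Int :=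
  if n = 1 ∨ n = 2 ∨ n = 3 then n
  else loopA (n - 3).toNat 1 2 3

-- ===== PORT B =====
structure Mat where
  a11 : Int
  a12 : Int
  a13 : Int
  a21 : Int
  a22 : Int
  a23 : Int
  a31 : Int
  a32 : Int
  a33 : Int
deriving Repr, DecidableEq

def matMul (x y : Mat) : Mat :=
  ⟨x.a11*y.a11 + x.a12*y.a21 + x.a13*y.a31,
   x.a11*y.a12 + x.a12*y.a22 + x.a13*y.a32,
   x.a11*y.a13 + x.a12*y.a23 + x.a13*y.a33,
   x.a21*y.a11 + x.a22*y.a21 + x.a23*y.a31,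
   x.a21*y.a12 + x.a22*y.a22 + x.a23*y.a32,
   x.a21*y.a13 + x.a22*y.a23 + x.a23*y.a33,
   x.a31*y.a11 + x.a32*y.a21 + x.a33*y.a31,
   x.a31*y.a12 + x.a32*y.a22 + x.a33*y.a32,
   x.a31*y.a13 + x.a32*y.a23 + x.a33*y.a33⟩

def matId : Mat := ⟨1,0,0, 0,1,0, 0,0,1⟩

def matM : Mat := ⟨0,1,0, 0,0,1, 3,2,1⟩

-- binary exponentiation; the fuel argument only makes the halving recursion structural
def matPowAux : Nat → Nat → Mat
  | 0, _ => matId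
  | _+1, 0 => matId
  | f+1, k+1 =>
    let half := matPowAux f ((k+1) / 2)
    let s := matMul half half
    if (k+1) % 2 = 1 then matMul s matM else s

def matPow (k : Nat) : Mat := matPowAux k k

def g_iter2_alt (n : Int) : Int :=
  if n = 1 ∨ n = 2 then n
  else
    let P := matPow (n - 3).toNat
    P.a31 * 1 + P.a32 * 2 + P.a33 * 3

-- ===== PRECONDITION & SPEC =====
def Spec_g_iter2 (n : Int) (out : Int) : Prop := out = g_iter2_alt n
instance (n : Int) (out : Int) : Decidable (Spec_g_iter2 n out) := by unfold Spec_g_iter2; infer_instance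

-- ===== CLAIM (what is proved, stated in full; the proofs are below) =====
def Claim_equal_g_iter2 : Prop := ∀ (n : Int), Dom_g_iter2 n → Spec_g_iter2 n (g_iter2 n)

-- ===== LEMMAS AND PROOFS =====
def powN : Nat → Mat
  | 0 => matId
  | k+1 => matMul (powN k) matM

theorem matMul_assoc (x y z : Mat) : matMul (matMul x y) z = matMul x (matMul y z) := by
  cases x; cases y; cases z
  simp only [matMul, Mat.mk.injEq]
  refine ⟨?_, ?_, ?_, ?_, ?_, ?_, ?_, ?_, ?_⟩ <;> ring

theorem powN_add (a b : Nat) : powN (a + b) = matMul (powN a) (powN b) := by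
  induction b with
  | zero => simp [powN, matMul, matId]
  | succ b ih =>
    show powN (a + b + 1) = _
    rw [powN, ih, powN, matMul_assoc]

theorem matPowAux_eq (f : Nat) : ∀ k : Nat, k ≤ f → matPowAux f k = powN k := by
  induction f with
  | zero =>
    intro k hk
    interval_cases k
    simp [matPowAux, powN]
  | succ f ih =>
    intro k hk
    match k with
    | 0 => simp [matPowAux, powN]
    | j+1 =>
      have hhalf : (j+1) / 2 ≤ f := by omega
      show (let half := matPowAux f ((j+1) / 2);
            let s := matMul half half;
            if (j+1) % 2 = 1 then matMul s matM else s) = powN (j+1)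
      rw [ih _ hhalf]
      rcases Nat.mod_two_eq_zero_or_one (j+1) with h2 | h2
      · have hk2 : (j+1) / 2 + (j+1) / 2 = j+1 := by omega
        simp [h2, ← powN_add, hk2]
      · have hk2 : (j+1) / 2 + (j+1) / 2 + 1 = j+1 := by omega
        simp only [h2, if_pos]
        rw [← powN_add, ← powN]
        congr 1

theorem matPow_eq (k : Nat) : matPow k = powN k :=
  matPowAux_eq k k le_rfl

def applyM (m : Mat) (v : Int × Int × Int) : Int × Int × Int :=
  (m.a11*v.1 + m.a12*v.2.1 + m.a13*v.2.2,
   m.a21*v.1 + m.a22*v.2.1 + m.a23*v.2.2,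
   m.a31*v.1 + m.a32*v.2.1 + m.a33*v.2.2)

theorem applyM_mul (x y : Mat) (v : Int × Int × Int) :
    applyM (matMul x y) v = applyM x (applyM y v) := by
  cases x; cases y
  simp only [applyM, matMul, Prod.mk.injEq]
  refine ⟨?_, ?_, ?_⟩ <;> ring

theorem loopA_eq (k : Nat) : ∀ a b c : Int,
    loopA k a b c = (applyM (powN k) (a, b, c)).2.2 := by
  induction k with
  | zero => intro a b c; simp [loopA, powN, applyM, matId]
  | succ k ih =>
    intro a b c
    show loopA k b c (c + 2*b + 3*a) = _
    rw [ih, powN, applyM_mul]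
    have : applyM matM (a, b, c) = (b, c, c + 2*b + 3*a) := by
      simp [applyM, matM]; ring
    rw [this]

-- ===== VERDICT (by name: the statement is the Claim_ definition above) =====
theorem g_iter2_spec : Claim_equal_g_iter2 := by
  intro n _
  unfold Spec_g_iter2 g_iter2 g_iter2_alt
  by_cases h12 : n = 1 ∨ n = 2
  · rcases h12 with h | h <;> simp [h]
  · simp only [h12, if_false]
    by_cases h3 : n = 3
    · simp [h3, matPow_eq, powN, matId]
    · have hne : ¬ (n = 1 ∨ n = 2 ∨ n = 3) := by
        rintro (h | h | h) <;> [exact h12 (Or.inl h); exact h12 (Or.inr h); exact h3 h]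
      simp only [hne, if_false]
      rw [loopA_eq, matPow_eq]
      simp [applyM]
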